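-- pv_equiv track=rewrite | github.com/Lebarnon/AdventOfCode | day6/solution.py | part1
-- ===== SOURCE A (Python) =====
-- def part1(input):
--   seq = []
--   for (i,c) in enumerate(input):
--     if(c in seq):
--       seq = seq[seq.index(c)+1:]
--     seq.append(c)
--     if(len(seq) == 4):
--       return i+1
--   return None
-- ===== SOURCE B (Python) =====
-- def part1(input):
--   for i in range(3, len(input)):
--     if len(set(input[i-3:i+1])) == 4:
--       return i + 1
--   return None
-- ===== Notes on version B (the rewrite author's own statement) =====
-- stated objective: simpler
-- what changed: Replaces A's incremental shrinking-window state (seq rebuilt via index/slice/append) by a direct scan of fixed 4-char windows checked for distinctness with a set.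
import Mathlib
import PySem

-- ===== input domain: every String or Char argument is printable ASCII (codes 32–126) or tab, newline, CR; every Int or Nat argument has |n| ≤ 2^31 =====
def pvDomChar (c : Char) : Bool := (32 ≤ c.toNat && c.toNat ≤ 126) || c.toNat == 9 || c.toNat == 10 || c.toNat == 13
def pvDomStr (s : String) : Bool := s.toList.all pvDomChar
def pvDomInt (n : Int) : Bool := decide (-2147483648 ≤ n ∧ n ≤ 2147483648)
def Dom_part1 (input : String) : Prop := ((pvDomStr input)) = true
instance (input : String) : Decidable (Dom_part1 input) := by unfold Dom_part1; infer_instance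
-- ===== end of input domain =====

-- B replaces A's incrementally shrunk duplicate-free window by a direct scan of fixed
-- 4-char windows checked for distinctness with a set (objective: simpler).

-- ===== PORT A =====
-- loop over enumerate(input) carrying (index i, current seq);
-- 'seq[seq.index(c)+1:]' is slice from index?+1 (the branch guard guarantees index? = some _,
-- so the getD default is never used)
def part1Loop : List Char → Int → List Char → Option Int
  | [], _, _ => none
  | c :: rest, i, seq =>
    let seq1 := if seq.contains c then
        PySem.List.slice seq (some ((((PySem.List.index? seq c).getD 0 : Nat) : Int) + 1)) none
      else seq
    let seq2 := seq1 ++ [c]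
    if seq2.length = 4 then some (i + 1) else part1Loop rest (i + 1) seq2

def part1 (input : String) : Option Int := part1Loop input.toList 0 []

-- ===== PORT B =====
-- 'for i in range(3, len(input)): if len(set(input[i-3:i+1])) == 4: return i+1'
def part1AltLoop (l : List Char) (i : Nat) : Option Int :=
  if _h : i < l.length then
    if (PySem.Set.ofList (PySem.List.slice l (some ((i : Int) - 3)) (some ((i : Int) + 1)))).length = 4
    then some ((i : Int) + 1)
    else part1AltLoop l (i + 1)
  else none
termination_by l.length - i

def part1_alt (input : String) : Option Int := part1AltLoop input.toList 3

-- ===== PRECONDITION & SPEC =====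
def Spec_part1 (input : String) (out : Option Int) : Prop := out = part1_alt input
instance (input : String) (out : Option Int) : Decidable (Spec_part1 input out) := by unfold Spec_part1; infer_instance

-- ===== CLAIM (what is proved, stated in full; the proofs are below) =====
def Claim_equal_part1 : Prop := ∀ (input : String), Dom_part1 input → Spec_part1 input (part1 input)

-- ===== LEMMAS AND PROOFS =====

-- set(xs) keeps a sublist of xs
lemma ofList_sublist (xs : List Char) : (PySem.Set.ofList xs).Sublist xs := by
  induction xs with
  | nil => simp [PySem.Set.ofList, PySem.Set.empty]
  | cons x xs ih =>
    rw [PySem.Set.ofList_cons]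
    exact List.Sublist.cons₂ x (List.filter_sublist.trans ih)

-- a duplicate makes len(set(xs)) < len(xs)
lemma length_ofList_lt_of_not_nodup (xs : List Char) (h : ¬ xs.Nodup) :
    (PySem.Set.ofList xs).length < xs.length := by
  rcases Nat.lt_or_ge (PySem.Set.ofList xs).length xs.length with hlt | hge
  · exact hlt
  · exfalso
    have hsub := ofList_sublist xs
    have : PySem.Set.ofList xs = xs :=
      hsub.eq_of_length (Nat.le_antisymm hsub.length_le hge)
    exact h (this ▸ PySem.Set.nodup_ofList xs)

-- unfolded step of B's loop at an in-range index i ≥ 3: the slice is the 4-window ending at i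
lemma altLoop_step (l : List Char) (n : Nat) (h3 : 3 ≤ n) (h : n < l.length) :
    part1AltLoop l n =
      if (PySem.Set.ofList ((l.drop (n - 3)).take 4)).length = 4
      then some ((n : Int) + 1) else part1AltLoop l (n + 1) := by
  rw [part1AltLoop]
  have e1 : ((n : Int) - 3) = ((n - 3 : Nat) : Int) := by omega
  have e2 : ((n : Int) + 1) = ((n + 1 : Nat) : Int) := by omega
  have e4 : (n + 1) - (n - 3) = 4 := by omega
  rw [dif_pos h, e1, e2, PySem.List.slice_natCast, e4]

lemma altLoop_none (l : List Char) (n : Nat) (h : l.length ≤ n) : part1AltLoop l n = none := by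
  rw [part1AltLoop, dif_neg (by omega)]

-- the 4-window ending at the last position of a prefix P (|P| = n+1, n ≥ 3) ignores the rest
lemma window_prefix (P R : List Char) (n : Nat) (hP : P.length = n + 1) (h3 : 3 ≤ n) :
    ((P ++ R).drop (n - 3)).take 4 = P.drop (n - 3) := by
  rw [List.drop_append_of_le_length (by omega)]
  have hlen : (P.drop (n - 3)).length = 4 := by simp [hP]; omega
  rw [List.take_append_of_le_length (by omega), List.take_of_length_le (by omega)]

-- A's loop invariant: seq is a duplicate-free suffix of the consumed prefix t ++ seq,
-- of length ≤ 3, and maximal (the char just before seq, if any, occurs in seq)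
def AInv (t seq : List Char) : Prop :=
  seq.Nodup ∧ seq.length ≤ 3 ∧ (t = [] ∨ ∃ d, t.getLast? = some d ∧ d ∈ seq)

-- a maximal short duplicate-free suffix makes the enclosing 4-window non-distinct
lemma window_not_nodup (t seq : List Char) (hI : AInv t seq) (h4 : 4 ≤ t.length + seq.length) :
    ¬ ((t ++ seq).drop (t.length + seq.length - 4)).Nodup := by
  obtain ⟨hnd, hlen, hmax⟩ := hI
  have ht : t ≠ [] := by
    rintro rfl; simp at h4; omega
  rcases hmax with rfl | ⟨d, hd, hdseq⟩
  · exact absurd rfl ht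
  obtain ⟨l', rfl⟩ := List.getLast?_eq_some_iff.mp hd
  rw [List.drop_append_of_le_length (by simp; omega), List.nodup_append]
  rintro ⟨-, -, hdisj⟩
  have hdt : d ∈ (l' ++ [d]).drop (l'.length + 1 + seq.length - 4) := by
    rw [List.drop_append_of_le_length (by simp; omega)]
    simp
  simp only [List.length_append, List.length_cons, List.length_nil] at hdisj
  exact hdisj d (by simpa using hdt) d hdseq rfl

-- a step of B at index n that A survives without returning (state (t', seq2), |t'|+|seq2| = n+1)
lemma skip_step (t' seq2 rest : List Char) (hI : AInv t' seq2) (n : Nat)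
    (hn : t'.length + seq2.length = n + 1) :
    part1AltLoop (t' ++ seq2 ++ rest) (max 3 n) = part1AltLoop (t' ++ seq2 ++ rest) (max 3 (n + 1)) := by
  by_cases h3 : n < 3
  · congr 1
    omega
  · have hm : max 3 n = n := by omega
    have hm' : max 3 (n + 1) = n + 1 := by omega
    rw [hm, hm', altLoop_step _ n (by omega) (by simp; omega)]
    have hw : (((t' ++ seq2) ++ rest).drop (n - 3)).take 4
        = (t' ++ seq2).drop (t'.length + seq2.length - 4) := by
      rw [window_prefix (t' ++ seq2) rest n (by simp; omega) (by omega)]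
      congr 1
      omega
    rw [hw, if_neg]
    intro hlen4
    have hnodup := window_not_nodup t' seq2 hI (by omega)
    have hlt := length_ofList_lt_of_not_nodup _ hnodup
    have hlw : ((t' ++ seq2).drop (t'.length + seq2.length - 4)).length = 4 := by
      simp; omega
    omega

-- main lemma: A's loop from state (i = |t|+|seq|, seq) with AInv t seq agrees with B's scan
lemma main_lemma (rest : List Char) : ∀ t seq : List Char, AInv t seq →
    part1Loop rest ((t.length + seq.length : Nat) : Int) seq
      = part1AltLoop (t ++ seq ++ rest) (max 3 (t.length + seq.length)) := by
  induction rest with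
  | nil =>
    intro t seq _
    rw [part1Loop]
    exact (altLoop_none _ _ (by simp)).symm
  | cons c rest ih =>
    intro t seq hI
    obtain ⟨hnd, hlen, hmax⟩ := hI
    rw [part1Loop]
    by_cases hc : c ∈ seq
    · -- duplicate: A shrinks seq to the part after the first occurrence of c
      obtain ⟨k, hk⟩ := Option.isSome_iff_exists.mp ((PySem.List.index?_isSome_iff seq c).mpr hc)
      obtain ⟨pre, suf, hseqeq, hkpre, hcpre⟩ := (PySem.List.index?_eq_some_iff seq c k).mp hk
      have hcontains : seq.contains c = true := by simpa using hc
      have hdrop : PySem.List.slice seq (some ((((PySem.List.index? seq c).getD 0 : Nat) : Int) + 1)) none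
          = suf := by
        rw [hk]
        simp only [Option.getD_some]
        rw [show ((k : Int) + 1) = ((k + 1 : Nat) : Int) by push_cast; ring,
          PySem.List.slice_from_natCast, hseqeq, ← hkpre]
        rw [show pre ++ c :: suf = (pre ++ [c]) ++ suf by simp]
        exact List.drop_left' (by simp)
      rw [if_pos hcontains, hdrop]
      have hsuf : (c :: suf).Nodup := by rw [hseqeq] at hnd; exact hnd.of_append_right
      have hcsuf : c ∉ suf := (List.nodup_cons.mp hsuf).1
      have hlen2 : (suf ++ [c]).length ≤ 3 := by
        have : seq.length = pre.length + 1 + suf.length := by simp [hseqeq]; omega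
        simp; omega
      rw [if_neg (by omega)]
      have hInv2 : AInv ((t ++ pre) ++ [c]) (suf ++ [c]) :=
        ⟨by simp [List.nodup_append, (List.nodup_cons.mp hsuf).2]
            exact fun a ha he => hcsuf (he ▸ ha), hlen2,
          Or.inr ⟨c, by simp, by simp⟩⟩
      have hcast : ((t.length + seq.length : Nat) : Int) + 1
          = ((((t ++ pre) ++ [c]).length + (suf ++ [c]).length : Nat) : Int) := by
        have : seq.length = pre.length + 1 + suf.length := by simp [hseqeq]; omega
        push_cast
        simp
        omega
      rw [hcast, ih _ _ hInv2]
      have hl : ((t ++ pre) ++ [c]) ++ (suf ++ [c]) ++ rest = t ++ seq ++ (c :: rest) := by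
        simp [hseqeq]
      have hn : ((t ++ pre) ++ [c]).length + (suf ++ [c]).length = (t.length + seq.length) + 1 := by
        have : seq.length = pre.length + 1 + suf.length := by simp [hseqeq]; omega
        simp; omega
      rw [hn, ← hl, ← skip_step _ _ _ hInv2 _ hn]
    · -- new character: A appends c
      have hcontains : seq.contains c = false := by simpa using hc
      rw [if_neg (show ¬ (seq.contains c = true) by simpa using hcontains)]
      have hndc : (seq ++ [c]).Nodup := by
        simp [List.nodup_append, hnd]
        exact fun a ha he => hc (he ▸ ha)
      by_cases hfull : seq.length = 3
      · -- the window fills up: both sides return i + 1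
        rw [if_pos (by simp [hfull])]  -- (seq ++ [c]).length = 4
        have hm : max 3 (t.length + seq.length) = t.length + seq.length := by omega
        rw [hm, altLoop_step _ _ (by omega) (by simp)]
        have hshape : t ++ seq ++ (c :: rest) = (t ++ seq ++ [c]) ++ rest := by simp
        have hw : ((t ++ seq ++ (c :: rest)).drop (t.length + seq.length - 3)).take 4
            = seq ++ [c] := by
          rw [hshape, window_prefix (t ++ seq ++ [c]) rest _ (by simp; omega) (by omega)]
          rw [show t.length + seq.length - 3 = t.length by omega, List.append_assoc,
            List.drop_left]
        rw [hw, if_pos (by rw [PySem.Set.ofList_eq_self_of_nodup _ hndc]; simp [hfull])]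
      · rw [if_neg (by simp; omega)]
        have hInv2 : AInv t (seq ++ [c]) := by
          refine ⟨hndc, by simp; omega, ?_⟩
          rcases hmax with rfl | ⟨d, hd, hds⟩
          · exact Or.inl rfl
          · exact Or.inr ⟨d, hd, by simp [hds]⟩
        have hcast : ((t.length + seq.length : Nat) : Int) + 1
            = ((t.length + (seq ++ [c]).length : Nat) : Int) := by
          push_cast; simp; ring
        have hn : t.length + (seq ++ [c]).length = (t.length + seq.length) + 1 := by
          simp; omega
        have hl : t ++ (seq ++ [c]) ++ rest = t ++ seq ++ (c :: rest) := by simp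
        rw [hcast, ih _ _ hInv2, hn, ← hl, ← skip_step _ _ _ hInv2 _ hn]

-- ===== VERDICT (by name: the statement is the Claim_ definition above) =====
theorem part1_spec : Claim_equal_part1 := by
  intro input _
  unfold Spec_part1 part1 part1_alt
  have h := main_lemma input.toList [] [] ⟨List.nodup_nil, by simp, Or.inl rfl⟩
  simpa using h
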